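-- pv_equiv track=rewrite | github.com/zivelo1/CopperPilot | scripts/schematics/modules/utils.py | get_component_type_category
-- ===== SOURCE A (Python) =====
-- def get_component_type_category(comp_type: str) -> str:
--     """Categorize component type for layout grouping."""
--     comp_lower = comp_type.lower()
--
--     if any(x in comp_lower for x in ['connector', 'jack', 'plug', 'terminal']):
--         return 'connector'
--     elif any(x in comp_lower for x in ['ic', 'chip', 'microcontroller', 'mcu', 'cpu']):
--         return 'ic'
--     elif any(x in comp_lower for x in ['transistor', 'mosfet', 'bjt', 'fet', 'jfet']):
--         return 'transistor'
--     elif any(x in comp_lower for x in ['resistor', 'res', 'r_']):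
--         return 'resistor'
--     elif any(x in comp_lower for x in ['capacitor', 'cap', 'c_']):
--         return 'capacitor'
--     elif any(x in comp_lower for x in ['inductor', 'coil', 'l_', 'transformer']):
--         return 'inductor'
--     elif any(x in comp_lower for x in ['diode', 'led', 'd_', 'rectifier', 'zener']):
--         return 'diode'
--     elif any(x in comp_lower for x in ['crystal', 'xtal', 'oscillator']):
--         return 'crystal'
--     elif any(x in comp_lower for x in ['switch', 'button', 'relay']):
--         return 'switch'
--     elif any(x in comp_lower for x in ['fuse', 'breaker']):
--         return 'fuse'
--     else:
--         return 'misc'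
-- ===== SOURCE B (Python) =====
-- _TABLE = [
--     ('connector', ['connector', 'jack', 'plug', 'terminal']),
--     ('ic', ['ic', 'chip', 'microcontroller', 'mcu', 'cpu']),
--     ('transistor', ['transistor', 'mosfet', 'bjt', 'fet', 'jfet']),
--     ('resistor', ['resistor', 'res', 'r_']),
--     ('capacitor', ['capacitor', 'cap', 'c_']),
--     ('inductor', ['inductor', 'coil', 'l_', 'transformer']),
--     ('diode', ['diode', 'led', 'd_', 'rectifier', 'zener']),
--     ('crystal', ['crystal', 'xtal', 'oscillator']),
--     ('switch', ['switch', 'button', 'relay']),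
--     ('fuse', ['fuse', 'breaker']),
-- ]
--
-- _CATEGORIES = [cat for cat, _ in _TABLE]
--
-- # Flat keyword -> priority map: each keyword carries the index of its category.
-- _KEYWORD_PRIORITY = [(kw, i) for i, (_, kws) in enumerate(_TABLE) for kw in kws]
--
--
-- def get_component_type_category(comp_type: str) -> str:
--     """Categorize component type for layout grouping."""
--     s = comp_type.lower()
--     best = min((p for kw, p in _KEYWORD_PRIORITY if kw in s), default=len(_TABLE))
--     return _CATEGORIES[best] if best < len(_TABLE) else 'misc'
-- ===== Notes on version B (the rewrite author's own statement) =====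
-- stated objective: alternative
-- what changed: Replaces the sequential first-match if/elif ladder with a flat keyword-to-priority map: B scans ALL keywords once (no early return), takes the minimum priority among matching keywords, and indexes into a category array ('misc' if nothing matched).
import Mathlib
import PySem

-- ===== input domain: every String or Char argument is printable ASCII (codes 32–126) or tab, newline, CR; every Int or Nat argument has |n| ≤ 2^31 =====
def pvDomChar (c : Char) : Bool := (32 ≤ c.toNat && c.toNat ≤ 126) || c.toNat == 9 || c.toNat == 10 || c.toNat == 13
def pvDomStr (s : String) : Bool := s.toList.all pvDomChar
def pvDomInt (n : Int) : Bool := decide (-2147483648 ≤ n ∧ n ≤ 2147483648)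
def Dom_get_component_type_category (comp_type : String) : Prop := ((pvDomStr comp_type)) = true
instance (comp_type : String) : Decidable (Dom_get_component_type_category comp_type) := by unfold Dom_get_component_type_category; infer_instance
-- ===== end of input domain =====

-- B replaces the if/elif keyword ladder with a flat keyword->priority map, a min-reduction over all matching keywords, and an array index (alternative algorithm; same cost).


-- ===== PORT A =====
def get_component_type_category (comp_type : String) : String :=
  let comp_lower := PySem.Str.lower comp_type
  if ["connector", "jack", "plug", "terminal"].any (fun x => PySem.Str.isIn x comp_lower) then "connector"
  else if ["ic", "chip", "microcontroller", "mcu", "cpu"].any (fun x => PySem.Str.isIn x comp_lower) then "ic"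
  else if ["transistor", "mosfet", "bjt", "fet", "jfet"].any (fun x => PySem.Str.isIn x comp_lower) then "transistor"
  else if ["resistor", "res", "r_"].any (fun x => PySem.Str.isIn x comp_lower) then "resistor"
  else if ["capacitor", "cap", "c_"].any (fun x => PySem.Str.isIn x comp_lower) then "capacitor"
  else if ["inductor", "coil", "l_", "transformer"].any (fun x => PySem.Str.isIn x comp_lower) then "inductor"
  else if ["diode", "led", "d_", "rectifier", "zener"].any (fun x => PySem.Str.isIn x comp_lower) then "diode"
  else if ["crystal", "xtal", "oscillator"].any (fun x => PySem.Str.isIn x comp_lower) then "crystal"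
  else if ["switch", "button", "relay"].any (fun x => PySem.Str.isIn x comp_lower) then "switch"
  else if ["fuse", "breaker"].any (fun x => PySem.Str.isIn x comp_lower) then "fuse"
  else "misc"

-- ===== PORT B =====
-- B-side helpers: the table, its category-name array, and the flat keyword->priority map
def pvTable : List (String × List String) :=
  [("connector", ["connector", "jack", "plug", "terminal"]),
   ("ic", ["ic", "chip", "microcontroller", "mcu", "cpu"]),
   ("transistor", ["transistor", "mosfet", "bjt", "fet", "jfet"]),
   ("resistor", ["resistor", "res", "r_"]),
   ("capacitor", ["capacitor", "cap", "c_"]),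
   ("inductor", ["inductor", "coil", "l_", "transformer"]),
   ("diode", ["diode", "led", "d_", "rectifier", "zener"]),
   ("crystal", ["crystal", "xtal", "oscillator"]),
   ("switch", ["switch", "button", "relay"]),
   ("fuse", ["fuse", "breaker"])]

def pvCategories : List String := pvTable.map Prod.fst

-- [(kw, i) for i, (_, kws) in enumerate(_TABLE) for kw in kws]
def pvFlattenFrom : Nat → List (String × List String) → List (String × Nat)
  | _, [] => []
  | i, (_, kws) :: rest => kws.map (fun k => (k, i)) ++ pvFlattenFrom (i + 1) rest

def pvKeywordPriority : List (String × Nat) := pvFlattenFrom 0 pvTable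

def get_component_type_category_alt (comp_type : String) : String :=
  let s := PySem.Str.lower comp_type
  let best :=
    match PySem.List.min?
        (pvKeywordPriority.filterMap
          (fun kp => if PySem.Str.isIn kp.1 s then some kp.2 else none))
        (fun p => p) with
    | some m => m
    | none => pvTable.length
  if best < pvTable.length then pvCategories.getD best "misc" else "misc"

-- ===== PRECONDITION & SPEC =====
def Spec_get_component_type_category (comp_type : String) (out : String) : Prop := out = get_component_type_category_alt comp_type
instance (comp_type : String) (out : String) : Decidable (Spec_get_component_type_category comp_type out) := by unfold Spec_get_component_type_category; infer_instance

-- ===== CLAIM (what is proved, stated in full; the proofs are below) =====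
def Claim_equal_get_component_type_category : Prop := ∀ (comp_type : String), Dom_get_component_type_category comp_type → Spec_get_component_type_category comp_type (get_component_type_category comp_type)

-- ===== LEMMAS AND PROOFS =====

-- proof-side view of B's min computation, with an arbitrary starting priority
def pvBest (s : String) (i : Nat) (t : List (String × List String)) : Nat :=
  match PySem.List.min?
      ((pvFlattenFrom i t).filterMap
        (fun kp => if PySem.Str.isIn kp.1 s then some kp.2 else none))
      (fun p => p) with
  | some m => m
  | none => i + t.length

theorem pvFlattenFrom_le (i : Nat) (t : List (String × List String)) :
    ∀ p ∈ pvFlattenFrom i t, i ≤ p.2 := by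
  induction t generalizing i with
  | nil => simp [pvFlattenFrom]
  | cons hd rest ih =>
    intro p hp
    simp only [pvFlattenFrom, List.mem_append, List.mem_map] at hp
    rcases hp with ⟨k, _, rfl⟩ | hp
    · exact Nat.le_refl i
    · exact Nat.le_of_succ_le (ih (i + 1) p hp)

theorem pvFoldlMin_eq (a : Nat) (l : List Nat) (h : ∀ x ∈ l, a ≤ x) :
    l.foldl min a = a := by
  induction l with
  | nil => rfl
  | cons x xs ih =>
    simp only [List.foldl_cons]
    rw [min_eq_left (h x (List.mem_cons_self))]
    exact ih (fun y hy => h y (List.mem_cons_of_mem x hy))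

theorem pvBest_nil (s : String) (i : Nat) : pvBest s i [] = i := by
  simp [pvBest, pvFlattenFrom, PySem.List.min?]

theorem pvBest_cons (s : String) (i : Nat) (c : String) (kws : List String)
    (rest : List (String × List String)) :
    pvBest s i ((c, kws) :: rest) =
      if kws.any (fun k => PySem.Str.isIn k s) then i else pvBest s (i + 1) rest := by
  unfold pvBest
  simp only [pvFlattenFrom, List.filterMap_append, List.filterMap_map]
  by_cases h : kws.any (fun k => PySem.Str.isIn k s) = true
  · simp only [h, if_pos]
    have hall1 : ∀ y ∈ kws.filterMap
        ((fun kp : String × Nat => if PySem.Str.isIn kp.1 s then some kp.2 else none) ∘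
          (fun k => (k, i))), y = i := by
      intro y hy
      rcases List.mem_filterMap.mp hy with ⟨k, _, hk⟩
      simp only [Function.comp_apply] at hk
      split at hk
      · exact (Option.some.inj hk).symm
      · exact absurd hk (by simp)
    have hmem : ∃ x t', kws.filterMap
        ((fun kp : String × Nat => if PySem.Str.isIn kp.1 s then some kp.2 else none) ∘
          (fun k => (k, i))) = x :: t' := by
      rcases List.any_eq_true.mp h with ⟨k, hk, hks⟩
      have hmemi : i ∈ kws.filterMap
          ((fun kp : String × Nat => if PySem.Str.isIn kp.1 s then some kp.2 else none) ∘
            (fun k => (k, i))) :=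
        List.mem_filterMap.mpr ⟨k, hk, by simp only [Function.comp_apply, hks, if_true]⟩
      exact List.exists_cons_of_ne_nil (fun hnil => by rw [hnil] at hmemi; exact List.not_mem_nil hmemi)
    rcases hmem with ⟨x, t', ht⟩
    have hall2 : ∀ y ∈ (pvFlattenFrom (i + 1) rest).filterMap
        (fun kp : String × Nat => if PySem.Str.isIn kp.1 s then some kp.2 else none), i ≤ y := by
      intro y hy
      rcases List.mem_filterMap.mp hy with ⟨kp, hkp, hk⟩
      have hle := pvFlattenFrom_le (i + 1) rest kp hkp
      split at hk
      · have := Option.some.inj hk; omega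
      · exact absurd hk (by simp)
    rw [ht]
    have hx : x = i := hall1 x (ht ▸ List.mem_cons_self)
    rw [List.cons_append, PySem.List.min?_id_cons]
    have hfold : (t' ++ (pvFlattenFrom (i + 1) rest).filterMap
        (fun kp : String × Nat => if PySem.Str.isIn kp.1 s then some kp.2 else none)).foldl min x = i := by
      rw [hx]
      apply pvFoldlMin_eq
      intro y hy
      rcases List.mem_append.mp hy with hy | hy
      · exact le_of_eq (hall1 y (ht ▸ List.mem_cons_of_mem x hy)).symm
      · exact hall2 y hy
    rw [hfold]
  · simp only [h, if_neg, Bool.false_eq_true, not_false_iff]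
    have hnil : kws.filterMap
        ((fun kp : String × Nat => if PySem.Str.isIn kp.1 s then some kp.2 else none) ∘
          (fun k => (k, i))) = [] := by
      rw [List.filterMap_eq_nil_iff]
      intro k hk
      have hf : PySem.Str.isIn k s = false := by
        cases hcase : PySem.Str.isIn k s
        · rfl
        · exact absurd (List.any_eq_true.mpr ⟨k, hk, hcase⟩) h
      simp only [Function.comp_apply, hf, Bool.false_eq_true, if_false]
    rw [hnil, List.nil_append]
    cases hm : PySem.List.min?
        ((pvFlattenFrom (i + 1) rest).filterMap
          (fun kp : String × Nat => if PySem.Str.isIn kp.1 s then some kp.2 else none))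
        (fun p => p) with
    | none => simp [List.length_cons]; omega
    | some m => simp

theorem alt_eq_pvBest (comp_type : String) :
    get_component_type_category_alt comp_type =
      (if pvBest (PySem.Str.lower comp_type) 0 pvTable < 10
       then pvCategories.getD (pvBest (PySem.Str.lower comp_type) 0 pvTable) "misc"
       else "misc") := rfl

theorem A_unfold (comp_type : String) :
    get_component_type_category comp_type =
      (if ["connector", "jack", "plug", "terminal"].any (fun x => PySem.Str.isIn x (PySem.Str.lower comp_type)) then "connector"
       else if ["ic", "chip", "microcontroller", "mcu", "cpu"].any (fun x => PySem.Str.isIn x (PySem.Str.lower comp_type)) then "ic"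
       else if ["transistor", "mosfet", "bjt", "fet", "jfet"].any (fun x => PySem.Str.isIn x (PySem.Str.lower comp_type)) then "transistor"
       else if ["resistor", "res", "r_"].any (fun x => PySem.Str.isIn x (PySem.Str.lower comp_type)) then "resistor"
       else if ["capacitor", "cap", "c_"].any (fun x => PySem.Str.isIn x (PySem.Str.lower comp_type)) then "capacitor"
       else if ["inductor", "coil", "l_", "transformer"].any (fun x => PySem.Str.isIn x (PySem.Str.lower comp_type)) then "inductor"
       else if ["diode", "led", "d_", "rectifier", "zener"].any (fun x => PySem.Str.isIn x (PySem.Str.lower comp_type)) then "diode"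
       else if ["crystal", "xtal", "oscillator"].any (fun x => PySem.Str.isIn x (PySem.Str.lower comp_type)) then "crystal"
       else if ["switch", "button", "relay"].any (fun x => PySem.Str.isIn x (PySem.Str.lower comp_type)) then "switch"
       else if ["fuse", "breaker"].any (fun x => PySem.Str.isIn x (PySem.Str.lower comp_type)) then "fuse"
       else "misc") := rfl

-- ===== VERDICT (by name: the statement is the Claim_ definition above) =====
set_option maxHeartbeats 1000000 in
theorem get_component_type_category_spec : Claim_equal_get_component_type_category := by
  intro comp_type _
  unfold Spec_get_component_type_category
  rw [alt_eq_pvBest, A_unfold]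
  have hT : pvTable = ("connector", ["connector", "jack", "plug", "terminal"]) ::
      ("ic", ["ic", "chip", "microcontroller", "mcu", "cpu"]) ::
      ("transistor", ["transistor", "mosfet", "bjt", "fet", "jfet"]) ::
      ("resistor", ["resistor", "res", "r_"]) ::
      ("capacitor", ["capacitor", "cap", "c_"]) ::
      ("inductor", ["inductor", "coil", "l_", "transformer"]) ::
      ("diode", ["diode", "led", "d_", "rectifier", "zener"]) ::
      ("crystal", ["crystal", "xtal", "oscillator"]) ::
      ("switch", ["switch", "button", "relay"]) ::
      ("fuse", ["fuse", "breaker"]) :: [] := rfl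
  rw [hT]
  simp only [pvBest_cons, pvBest_nil]
  generalize (["connector", "jack", "plug", "terminal"].any fun x => PySem.Str.isIn x (PySem.Str.lower comp_type)) = b0
  generalize (["ic", "chip", "microcontroller", "mcu", "cpu"].any fun x => PySem.Str.isIn x (PySem.Str.lower comp_type)) = b1
  generalize (["transistor", "mosfet", "bjt", "fet", "jfet"].any fun x => PySem.Str.isIn x (PySem.Str.lower comp_type)) = b2
  generalize (["resistor", "res", "r_"].any fun x => PySem.Str.isIn x (PySem.Str.lower comp_type)) = b3
  generalize (["capacitor", "cap", "c_"].any fun x => PySem.Str.isIn x (PySem.Str.lower comp_type)) = b4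
  generalize (["inductor", "coil", "l_", "transformer"].any fun x => PySem.Str.isIn x (PySem.Str.lower comp_type)) = b5
  generalize (["diode", "led", "d_", "rectifier", "zener"].any fun x => PySem.Str.isIn x (PySem.Str.lower comp_type)) = b6
  generalize (["crystal", "xtal", "oscillator"].any fun x => PySem.Str.isIn x (PySem.Str.lower comp_type)) = b7
  generalize (["switch", "button", "relay"].any fun x => PySem.Str.isIn x (PySem.Str.lower comp_type)) = b8
  generalize (["fuse", "breaker"].any fun x => PySem.Str.isIn x (PySem.Str.lower comp_type)) = b9
  cases b0 <;> cases b1 <;> cases b2 <;> cases b3 <;> cases b4 <;> cases b5 <;> cases b6 <;> cases b7 <;> cases b8 <;> cases b9 <;> rfl
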